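-- pv_equiv track=rewrite | github.com/omar-vargas/Prueba-tecnica | project/src/utils/settings.py | _strip_env
-- ===== SOURCE A (Python) =====
-- from typing import Optional
--
-- def _strip_env(value: Optional[str]) -> Optional[str]:
--     """Quita espacios y comillas sueltas al inicio/fin (p. ej. ``KEY= \"https://...`` sin cierre correcto)."""
--     if value is None:
--         return None
--     s = value.strip()
--     while s and s[0] in {'"', "'"}:
--         s = s[1:].lstrip()
--     while s and s[-1] in {'"', "'"}:
--         s = s[:-1].rstrip()
--     return s or None
-- ===== SOURCE B (Python) =====
-- from typing import Optional
--
-- def _strip_env(value: Optional[str]) -> Optional[str]: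
--     if value is None:
--         return None
--     return value.strip(" \t\n\r\x0b\x0c'\"") or None
-- ===== Notes on version B (the rewrite author's own statement) =====
-- stated objective: idiomatic
-- what changed: A's interleaved quote-popping/strip loops are replaced by a single str.strip call whose character set is whitespace plus both quote characters (one bidirectional trim instead of repeated slice-and-strip).
import Mathlib
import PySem

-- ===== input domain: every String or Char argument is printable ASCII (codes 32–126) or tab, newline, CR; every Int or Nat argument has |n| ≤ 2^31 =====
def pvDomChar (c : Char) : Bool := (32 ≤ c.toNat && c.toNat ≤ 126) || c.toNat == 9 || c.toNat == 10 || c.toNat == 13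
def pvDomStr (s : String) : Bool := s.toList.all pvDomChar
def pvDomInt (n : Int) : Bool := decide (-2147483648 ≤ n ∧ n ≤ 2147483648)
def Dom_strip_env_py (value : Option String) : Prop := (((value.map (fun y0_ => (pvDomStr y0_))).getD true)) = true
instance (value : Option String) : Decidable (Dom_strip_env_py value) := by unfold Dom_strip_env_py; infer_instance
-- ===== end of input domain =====

-- B replaces A's interleaved quote-popping/strip loops by one strip over whitespace-plus-quotes; proved equal on Dom.

-- ===== PORT A =====
-- s[0] in {'"', "'"}
def pvIsQuote (c : Char) : Bool := c == '"' || c == '\''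

-- "while s and s[0] in {'\"', \"'\"}: s = s[1:].lstrip()"  (the second while loop is the
-- same loop run on the reversed character list, exactly as rstrip/s[:-1] act there)
def pvQuoteTrim : List Char → List Char
  | [] => []
  | c :: rest =>
    if pvIsQuote c then pvQuoteTrim (rest.dropWhile PySem.Chars.isspace)
    else c :: rest
termination_by l => l.length
decreasing_by
  have := List.length_dropWhile_le PySem.Chars.isspace rest
  simp; omega

def strip_env_py (value : Option String) : Option String :=
  match value with
  | none => none
  | some v =>
    let s0 := PySem.Chars.strip v.toList
    let s1 := pvQuoteTrim s0
    let s2 := (pvQuoteTrim s1.reverse).reverse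
    if s2.isEmpty then none else some (String.ofList s2)

-- ===== PORT B =====
-- the character-set argument " \t\n\r\x0b\x0c'\"" of value.strip(...)
def pvStripSet : List Char := [' ', '\t', '\n', '\r', '\x0b', '\x0c', '\'', '"']

def strip_env_py_alt (value : Option String) : Option String :=
  match value with
  | none => none
  | some v =>
    let s := PySem.Chars.stripChars v.toList pvStripSet
    if s.isEmpty then none else some (String.ofList s)

-- ===== PRECONDITION & SPEC =====
def Spec_strip_env_py (value : Option String) (out : Option String) : Prop := out = strip_env_py_alt value
instance (value : Option String) (out : Option String) : Decidable (Spec_strip_env_py value out) := by unfold Spec_strip_env_py; infer_instance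

-- ===== CLAIM (what is proved, stated in full; the proofs are below) =====
def Claim_equal_strip_env_py : Prop := ∀ (value : Option String), Dom_strip_env_py value → Spec_strip_env_py value (strip_env_py value)

-- ===== LEMMAS AND PROOFS =====

-- the combined predicate both programs trim by (on Dom characters)
def pvTrimP (c : Char) : Bool := PySem.Chars.isspace c || pvIsQuote c

-- dropWhile with the stronger predicate absorbs a prior dropWhile with a weaker one
theorem pv_dropWhile_absorb {α : Type} (p q : α → Bool) (h : ∀ a, q a = true → p a = true) :
    ∀ l : List α, (l.dropWhile q).dropWhile p = l.dropWhile p := by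
  intro l
  induction l with
  | nil => rfl
  | cons c t ih =>
    by_cases hq : q c = true
    · rw [List.dropWhile_cons]
      simp only [hq, if_true, ih]
      rw [List.dropWhile_cons, h c hq]
      simp
    · have hq' : q c = false := by simpa using hq
      rw [List.dropWhile_cons]
      simp [hq']

-- right trim of a nonempty-result list keeps the head: Rq (c::t) = c :: Rq t or []
theorem pv_rtrim_cons (q : Char → Bool) (c : Char) (t : List Char)
    (h : ((List.dropWhile q (c :: t).reverse).reverse) ≠ []) :
    (List.dropWhile q (c :: t).reverse).reverse = c :: (List.dropWhile q t.reverse).reverse := by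
  rw [List.reverse_cons] at *
  rcases hd : List.dropWhile q t.reverse with _ | ⟨d, u⟩
  · rw [List.dropWhile_append] at h ⊢
    simp [hd] at h ⊢
    rcases hqc : q c with _ | _
    · simp
    · simp [hqc] at h
  · rw [List.dropWhile_append]
    simp [hd]

-- left trim commutes with right trim (any two predicates)
theorem pv_commute (p q : Char → Bool) :
    ∀ l : List Char, List.dropWhile p ((List.dropWhile q l.reverse).reverse)
      = (List.dropWhile q (List.dropWhile p l).reverse).reverse := by
  intro l
  induction l with
  | nil => rfl
  | cons c t ih =>
    by_cases hne : (List.dropWhile q (c :: t).reverse).reverse = []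
    · -- the whole list right-trims away: every element satisfies q
      have hall : ∀ x ∈ (c :: t), q x = true := by
        have hnil : List.dropWhile q (c :: t).reverse = [] := by
          simpa using congrArg List.reverse hne
        intro x hx
        exact (List.dropWhile_eq_nil_iff).1 hnil x (List.mem_reverse.2 hx)
      have hr : List.dropWhile q (List.dropWhile p (c :: t)).reverse = [] := by
        rw [List.dropWhile_eq_nil_iff]
        intro x hx
        exact hall x ((List.dropWhile_sublist p).mem (List.mem_reverse.1 hx))
      rw [hne, hr]
      simp
    · have hcons : (List.dropWhile q (c :: t).reverse).reverse
          = c :: (List.dropWhile q t.reverse).reverse := pv_rtrim_cons q c t hne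
      by_cases hp : p c = true
      · rw [hcons]
        simp only [List.dropWhile_cons, hp, if_true]
        exact ih
      · have hp' : p c = false := by simpa using hp
        rw [hcons]
        simp only [List.dropWhile_cons, hp', Bool.false_eq_true, if_false]
        exact hcons.symm

-- A's quote loop on an already-lstripped list is one dropWhile with the combined predicate
theorem pv_quoteTrim_dropWhile :
    ∀ n (l : List Char), l.length ≤ n →
      pvQuoteTrim (l.dropWhile PySem.Chars.isspace) = l.dropWhile pvTrimP := by
  intro n
  induction n with
  | zero =>
    intro l hl
    have : l = [] := List.eq_nil_of_length_eq_zero (Nat.le_zero.1 hl)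
    subst this; simp [pvQuoteTrim]
  | succ n ih =>
    intro l hl
    rcases hd : l.dropWhile PySem.Chars.isspace with _ | ⟨c, u⟩
    · have hall := (List.dropWhile_eq_nil_iff).1 hd
      have : l.dropWhile pvTrimP = [] := by
        rw [List.dropWhile_eq_nil_iff]
        intro x hx
        simp [pvTrimP, hall x hx]
      rw [this, pvQuoteTrim]
    · have hqc : PySem.Chars.isspace c = false := by
        have := List.head_dropWhile_not PySem.Chars.isspace (l := l) (by simp [hd])
        simpa [hd] using this
      have habs : l.dropWhile pvTrimP = (c :: u).dropWhile pvTrimP := by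
        rw [← hd, pv_dropWhile_absorb pvTrimP PySem.Chars.isspace
          (fun a ha => by simp [pvTrimP, ha])]
      rw [habs]
      by_cases hr : pvIsQuote c = true
      · have hulen : u.length ≤ n := by
          have hsfx : (c :: u) <:+ l := hd ▸ List.dropWhile_suffix _
          have := hsfx.length_le
          simp at this; omega
        rw [pvQuoteTrim]
        simp only [hr, if_true]
        rw [ih u hulen]
        simp [pvTrimP, hr]
      · have hr' : pvIsQuote c = false := by simpa using hr
        rw [pvQuoteTrim]
        simp [hr', pvTrimP, hqc]

-- on Dom characters the strip set membership IS the combined predicate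
theorem pv_chToNat_inj (a b : Char) : a.toNat = b.toNat ↔ a = b := by
  constructor
  · intro h; exact Char.ext (UInt32.toNat_inj.mp h)
  · intro h; rw [h]

theorem pv_stripSet_eq (c : Char) (h : pvDomChar c = true) :
    pvStripSet.contains c = pvTrimP c := by
  simp only [pvDomChar, Bool.or_eq_true, Bool.and_eq_true, beq_iff_eq,
    decide_eq_true_eq] at h
  rw [Bool.eq_iff_iff]
  simp only [pvStripSet, pvTrimP, pvIsQuote, PySem.Chars.isspace, List.contains_cons,
    List.contains_nil, Bool.or_eq_true, Bool.and_eq_true, beq_iff_eq, decide_eq_true_eq,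
    Bool.false_eq_true, or_false, ← pv_chToNat_inj]
  have e1 : (' ' : Char).toNat = 32 := rfl
  have e2 : ('\t' : Char).toNat = 9 := rfl
  have e3 : ('\n' : Char).toNat = 10 := rfl
  have e4 : ('\r' : Char).toNat = 13 := rfl
  have e5 : ('\x0b' : Char).toNat = 11 := rfl
  have e6 : ('\x0c' : Char).toNat = 12 := rfl
  have e7 : ('\'' : Char).toNat = 39 := rfl
  have e8 : ('"' : Char).toNat = 34 := rfl
  rw [e1, e2, e3, e4, e5, e6, e7, e8]
  omega

-- dropWhile respects pointwise-equal predicates on the list's elements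
theorem pv_dropWhile_congr {α : Type} (p q : α → Bool) :
    ∀ l : List α, (∀ a ∈ l, p a = q a) → l.dropWhile p = l.dropWhile q := by
  intro l
  induction l with
  | nil => intro _; rfl
  | cons c t ih =>
    intro h
    have hc := h c (by simp)
    rcases hq : q c with _ | _
    · simp [hc, hq]
    · simp only [List.dropWhile_cons, hc, hq, if_true]
      exact ih (fun a ha => h a (by simp [ha]))

-- ===== VERDICT (by name: the statement is the Claim_ definition above) =====
theorem strip_env_py_spec : Claim_equal_strip_env_py := by
  intro value hdom
  unfold Spec_strip_env_py
  match value with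
  | none => rfl
  | some v =>
    simp only [strip_env_py, strip_env_py_alt]
    have hdomv : ∀ c ∈ v.toList, pvDomChar c = true := by
      simp only [Dom_strip_env_py, Option.map_some, Option.getD_some, pvDomStr] at hdom
      exact fun c hc => by
        have := List.all_eq_true.1 hdom c hc
        simpa using this
    set l := v.toList with hl
    -- rewrite A's side into dropWhile form
    have hstrip : PySem.Chars.strip l
        = List.dropWhile PySem.Chars.isspace
            ((List.dropWhile PySem.Chars.isspace l.reverse).reverse) := by
      simp only [PySem.Chars.strip, PySem.Chars.lstrip, PySem.Chars.rstrip]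
      exact (pv_commute PySem.Chars.isspace PySem.Chars.isspace l).symm
    have h1 : pvQuoteTrim (PySem.Chars.strip l)
        = (List.dropWhile PySem.Chars.isspace
            (List.dropWhile pvTrimP l).reverse).reverse := by
      rw [hstrip,
        pv_quoteTrim_dropWhile ((List.dropWhile PySem.Chars.isspace l.reverse).reverse).length _
          (le_refl _),
        pv_commute pvTrimP PySem.Chars.isspace l]
    have h2 : (pvQuoteTrim (pvQuoteTrim (PySem.Chars.strip l)).reverse).reverse
        = (List.dropWhile pvTrimP (List.dropWhile pvTrimP l).reverse).reverse := by
      rw [h1]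
      rw [List.reverse_reverse]
      rw [pv_quoteTrim_dropWhile ((List.dropWhile pvTrimP l).reverse).length _ (le_refl _)]
    -- rewrite B's side into the same dropWhile form
    have h3 : PySem.Chars.stripChars l pvStripSet
        = (List.dropWhile pvTrimP (List.dropWhile pvTrimP l).reverse).reverse := by
      simp only [PySem.Chars.stripChars]
      have hin : List.dropWhile (fun c => pvStripSet.contains c) l
          = List.dropWhile pvTrimP l := by
        exact pv_dropWhile_congr _ _ l (fun a ha => pv_stripSet_eq a (hdomv a ha))
      rw [hin]
      congr 1
      exact pv_dropWhile_congr _ _ _ (fun a ha => by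
        have : a ∈ l := (List.dropWhile_sublist pvTrimP).mem (List.mem_reverse.1 ha)
        exact pv_stripSet_eq a (hdomv a this))
    rw [h2, h3]
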